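-- pv_equiv track=rewrite | github.com/fortestaicode/webstrike_pro | core/waf_evasion.py | _comment_injection
-- ===== SOURCE A (Python) =====
-- def _comment_injection(payload: str, param_type: str) -> str:
--     """Inject SQL/JS comments inside blocked words"""
--     if param_type == "sql":
--         blocked = ['union', 'select', 'from']
--         result = payload
--         for word in blocked:
--             if word in result.lower():
--                 obfuscated = word[:2] + '/**/' + word[2:]
--                 result = result.replace(word, obfuscated)
--         return result
--     else:
--         return payload.replace('script', 'scri/**/pt')
-- ===== SOURCE B (Python) =====
-- def _comment_injection(payload: str, param_type: str) -> str:
--     """Single left-to-right scan: at each position emit the obfuscated form of a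
--     matched blocked keyword (and skip it) or copy one character."""
--     out = []
--     i = 0
--     n = len(payload)
--     if param_type == "sql":
--         while i < n:
--             if payload.startswith('union', i):
--                 out.append('un/**/ion')
--                 i += 5
--             elif payload.startswith('select', i):
--                 out.append('se/**/lect')
--                 i += 6
--             elif payload.startswith('from', i):
--                 out.append('fr/**/om')
--                 i += 4
--             else:
--                 out.append(payload[i])
--                 i += 1
--     else:
--         while i < n:
--             if payload.startswith('script', i):
--                 out.append('scri/**/pt')
--                 i += 6
--             else:
--                 out.append(payload[i])
--                 i += 1
--     return ''.join(out)
-- ===== Notes on version B (the rewrite author's own statement) =====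
-- stated objective: alternative
-- what changed: Replaced the three sequential full-string .replace() passes (each guarded by a lowercase membership test) with a single left-to-right scan that matches any blocked keyword at the current position, emits its obfuscated form and skips it; the guard disappears since the keywords are pairwise non-overlapping.
import Mathlib
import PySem

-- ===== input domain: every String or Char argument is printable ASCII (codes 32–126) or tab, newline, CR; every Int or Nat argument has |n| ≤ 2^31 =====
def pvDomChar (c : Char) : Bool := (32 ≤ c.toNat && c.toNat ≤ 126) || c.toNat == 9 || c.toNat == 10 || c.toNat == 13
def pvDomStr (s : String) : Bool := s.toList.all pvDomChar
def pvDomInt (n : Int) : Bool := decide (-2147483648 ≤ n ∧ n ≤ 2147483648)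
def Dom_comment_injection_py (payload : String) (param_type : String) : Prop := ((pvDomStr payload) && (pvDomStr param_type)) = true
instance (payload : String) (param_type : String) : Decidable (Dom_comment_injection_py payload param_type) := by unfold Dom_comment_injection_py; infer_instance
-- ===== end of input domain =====

-- B replaces A's three guarded sequential full-string replace passes by a single
-- left-to-right scan that obfuscates whichever blocked keyword matches at each position
-- (alternative decomposition; same asymptotic cost).


-- ===== PORT A =====
-- for word in ['union','select','from']: if word in result.lower(): result = result.replace(word, word[:2]+'/**/'+word[2:])
def comment_injection_py (payload : String) (param_type : String) : String :=
  if param_type == "sql" then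
    String.ofList
      (([("union".toList), ("select".toList), ("from".toList)]).foldl
        (fun result word =>
          if PySem.Chars.isIn word (PySem.Chars.lower result) then
            PySem.Chars.replace result word
              (PySem.Chars.slice word none (some 2) ++ ("/**/".toList) ++ PySem.Chars.slice word (some 2) none)
          else result) payload.toList)
  else
    PySem.Str.replace payload "script" "scri/**/pt"

-- ===== PORT B =====
-- Source B's sql while-loop: at each index match one keyword (or copy the char) and advance
def scanSql : List Char → List Char
  | [] => []
  | c :: t =>
    if List.isPrefixOf ("union".toList) (c :: t) then
      "un/**/ion".toList ++ scanSql (t.drop 4)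
    else if List.isPrefixOf ("select".toList) (c :: t) then
      "se/**/lect".toList ++ scanSql (t.drop 5)
    else if List.isPrefixOf ("from".toList) (c :: t) then
      "fr/**/om".toList ++ scanSql (t.drop 3)
    else c :: scanSql t
  termination_by l => l.length
  decreasing_by all_goals (simp; try omega)

-- Source B's non-sql while-loop
def scanJs : List Char → List Char
  | [] => []
  | c :: t =>
    if List.isPrefixOf ("script".toList) (c :: t) then
      "scri/**/pt".toList ++ scanJs (t.drop 5)
    else c :: scanJs t
  termination_by l => l.length
  decreasing_by all_goals (simp; try omega)

def comment_injection_py_alt (payload : String) (param_type : String) : String :=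
  if param_type == "sql" then String.ofList (scanSql payload.toList)
  else String.ofList (scanJs payload.toList)

-- ===== PRECONDITION & SPEC =====
def Spec_comment_injection_py (payload : String) (param_type : String) (out : String) : Prop := out = comment_injection_py_alt payload param_type
instance (payload : String) (param_type : String) (out : String) : Decidable (Spec_comment_injection_py payload param_type out) := by unfold Spec_comment_injection_py; infer_instance

-- ===== CLAIM (what is proved, stated in full; the proofs are below) =====
def Claim_equal_comment_injection_py : Prop := ∀ (payload : String) (param_type : String), Dom_comment_injection_py payload param_type → Spec_comment_injection_py payload param_type (comment_injection_py payload param_type)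

-- ===== LEMMAS AND PROOFS =====

-- recursive characterisation of Python str.replace (used for nonempty patterns)
def repc (old new : List Char) : List Char → List Char
  | [] => []
  | c :: t =>
    if List.isPrefixOf old (c :: t) then new ++ repc old new (t.drop (old.length - 1))
    else c :: repc old new t
  termination_by l => l.length
  decreasing_by all_goals (simp; try omega)

theorem replace_go_eq (old new : List Char) (h : old ≠ []) :
    ∀ fuel l acc, l.length ≤ fuel →
      PySem.Chars.replace.go old new fuel l acc = acc.reverse ++ repc old new l := by
  intro fuel
  induction fuel with
  | zero =>
    intro l acc hl
    have : l = [] := by cases l with | nil => rfl | cons c t => simp at hl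
    subst this
    simp [PySem.Chars.replace.go, repc]
  | succ n ih =>
    intro l acc hl
    cases l with
    | nil => simp [PySem.Chars.replace.go, repc]
    | cons c t =>
      rw [PySem.Chars.replace.go]
      by_cases hp : List.isPrefixOf old (c :: t)
      · simp only [hp, if_true]
        obtain ⟨o, os, rfl⟩ : ∃ o os, old = o :: os := by
          cases old with
          | nil => exact absurd rfl h
          | cons o os => exact ⟨o, os, rfl⟩
        have hdrop : List.drop (o :: os).length (c :: t) = t.drop os.length := by simp
        rw [hdrop, ih _ _ (by
          have := List.length_drop (l := t) (i := os.length)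
          simp at hl ⊢
          omega)]
        rw [repc]
        simp [hp]
      · simp only [hp]
        rw [ih t (c :: acc) (by simp at hl ⊢; omega)]
        rw [repc]
        simp [hp]

theorem replace_eq_repc (s old new : List Char) (h : old ≠ []) :
    PySem.Chars.replace s old new = repc old new s := by
  unfold PySem.Chars.replace
  rw [if_neg (by simp [List.isEmpty_iff, h])]
  rw [replace_go_eq old new h s.length s [] le_rfl]
  simp

theorem repc_of_not_infix (old new s : List Char) (h : ¬ old <:+: s) :
    repc old new s = s := by
  induction s with
  | nil => rw [repc]
  | cons c t ih =>
    rw [repc]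
    rw [if_neg (by
      intro hp
      exact h (List.isPrefixOf_iff_prefix.mp hp).isInfix)]
    rw [ih (fun hi => h (List.infix_cons hi))]

theorem repc_append (o : Char) (os new : List Char) (a x : List Char) (h : ∀ c ∈ a, c ≠ o) :
    repc (o :: os) new (a ++ x) = a ++ repc (o :: os) new x := by
  induction a with
  | nil => simp
  | cons c a' ih =>
    simp only [List.cons_append]
    rw [repc]
    rw [if_neg (by
      intro hp
      have := (List.cons_prefix_cons.mp (List.isPrefixOf_iff_prefix.mp hp)).1
      exact h c (by simp) this.symm)]
    rw [ih (fun c hc => h c (by simp [hc]))]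

theorem repc_emit (o : Char) (os new x : List Char) :
    repc (o :: os) new ((o :: os) ++ x) = new ++ repc (o :: os) new x := by
  rw [List.cons_append, repc]
  rw [if_pos (List.isPrefixOf_iff_prefix.mpr (by
    rw [List.cons_prefix_cons]
    exact ⟨rfl, List.prefix_append os x⟩))]
  simp

theorem prefix_transfer (o : Char) (os ns : List Char) :
    ∀ x p, (∀ c ∈ p, c ≠ o) →
      ((p <+: repc (o :: os) (o :: ns) x) ↔ p <+: x) := by
  have main : ∀ n (x : List Char), x.length ≤ n → ∀ p, (∀ c ∈ p, c ≠ o) →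
      ((p <+: repc (o :: os) (o :: ns) x) ↔ p <+: x) := by
    intro n
    induction n with
    | zero =>
      intro x hx p hp
      have : x = [] := by cases x with | nil => rfl | cons c t => simp at hx
      subst this; rw [repc]
    | succ m ihm =>
      intro x hx p hp
      cases x with
      | nil => rw [repc]
      | cons c t =>
        rw [repc]
        by_cases hpre : List.isPrefixOf (o :: os) (c :: t)
        · rw [if_pos hpre]
          have hc : c = o :=
            ((List.cons_prefix_cons.mp (List.isPrefixOf_iff_prefix.mp hpre)).1).symm
          cases p with
          | nil => simp
          | cons a p' =>
            have ha : a ≠ o := hp a (by simp)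
            constructor
            · intro hpr
              have := (List.cons_prefix_cons.mp (by simpa using hpr)).1
              exact absurd this ha
            · intro hpr
              have := (List.cons_prefix_cons.mp hpr).1
              exact absurd (this.trans hc) ha
        · rw [if_neg hpre]
          cases p with
          | nil => simp
          | cons a p' =>
            rw [List.cons_prefix_cons, List.cons_prefix_cons]
            have ht : t.length ≤ m := by simp at hx; omega
            have hp' : ∀ c ∈ p', c ≠ o := fun c hc => hp c (by simp [hc])
            rw [ihm t ht p' hp']
  exact fun x => main x.length x le_rfl

theorem chain_eq_scanSql (s : List Char) :
    repc ("from".toList) ("fr/**/om".toList)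
      (repc ("select".toList) ("se/**/lect".toList)
        (repc ("union".toList) ("un/**/ion".toList) s)) = scanSql s := by
  have main : ∀ n (s : List Char), s.length ≤ n →
      repc ("from".toList) ("fr/**/om".toList)
        (repc ("select".toList) ("se/**/lect".toList)
          (repc ("union".toList) ("un/**/ion".toList) s)) = scanSql s := by
    intro n
    induction n with
    | zero =>
      intro s hs
      have : s = [] := by cases s with | nil => rfl | cons c t => simp at hs
      subst this
      rw [repc, repc, repc, scanSql]
    | succ m ihm =>
      intro s hs
      cases s with
      | nil => rw [repc, repc, repc, scanSql]
      | cons c t =>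
        by_cases h1 : List.isPrefixOf ("union".toList) (c :: t)
        · obtain ⟨r, hr⟩ := List.isPrefixOf_iff_prefix.mp h1
          obtain ⟨rfl, rfl⟩ : c = 'u' ∧ t = 'n'::'i'::'o'::'n'::r := by
            simpa using hr.symm
          have e1 : repc ("union".toList) ("un/**/ion".toList) ('u'::'n'::'i'::'o'::'n'::r)
              = "un/**/ion".toList ++ repc ("union".toList) ("un/**/ion".toList) r :=
            repc_emit 'u' "nion".toList "un/**/ion".toList r
          rw [e1]
          have e2 : repc ("select".toList) ("se/**/lect".toList)
                ("un/**/ion".toList ++ repc ("union".toList) ("un/**/ion".toList) r)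
              = "un/**/ion".toList ++ repc ("select".toList) ("se/**/lect".toList)
                  (repc ("union".toList) ("un/**/ion".toList) r) :=
            repc_append 's' "elect".toList ("se/**/lect".toList) ['u','n','/','*','*','/','i','o','n'] _ (by intro c hc; fin_cases hc <;> decide)
          rw [e2]
          have e3 : repc ("from".toList) ("fr/**/om".toList)
                ("un/**/ion".toList ++ repc ("select".toList) ("se/**/lect".toList)
                  (repc ("union".toList) ("un/**/ion".toList) r))
              = "un/**/ion".toList ++ repc ("from".toList) ("fr/**/om".toList)
                  (repc ("select".toList) ("se/**/lect".toList)
                    (repc ("union".toList) ("un/**/ion".toList) r)) :=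
            repc_append 'f' "rom".toList ("fr/**/om".toList) ['u','n','/','*','*','/','i','o','n'] _ (by intro c hc; fin_cases hc <;> decide)
          rw [e3]
          rw [scanSql, if_pos h1]
          have hdrop : ('n'::'i'::'o'::'n'::r).drop 4 = r := rfl
          rw [hdrop, ihm r (by simp at hs; omega)]
        · by_cases h2 : List.isPrefixOf ("select".toList) (c :: t)
          · obtain ⟨r, hr⟩ := List.isPrefixOf_iff_prefix.mp h2
            obtain ⟨rfl, rfl⟩ : c = 's' ∧ t = 'e'::'l'::'e'::'c'::'t'::r := by
              simpa using hr.symm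
            have e1 : repc ("union".toList) ("un/**/ion".toList) ('s'::'e'::'l'::'e'::'c'::'t'::r)
                = 's'::'e'::'l'::'e'::'c'::'t':: repc ("union".toList) ("un/**/ion".toList) r :=
              repc_append 'u' "nion".toList ['u','n','/','*','*','/','i','o','n'] ['s','e','l','e','c','t'] r (by intro c hc; fin_cases hc <;> decide)
            rw [e1]
            have e2 : repc ("select".toList) ("se/**/lect".toList)
                  ('s'::'e'::'l'::'e'::'c'::'t':: repc ("union".toList) ("un/**/ion".toList) r)
                = "se/**/lect".toList ++ repc ("select".toList) ("se/**/lect".toList)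
                    (repc ("union".toList) ("un/**/ion".toList) r) :=
              repc_emit 's' "elect".toList "se/**/lect".toList _
            rw [e2]
            have e3 : repc ("from".toList) ("fr/**/om".toList)
                  ("se/**/lect".toList ++ repc ("select".toList) ("se/**/lect".toList)
                    (repc ("union".toList) ("un/**/ion".toList) r))
                = "se/**/lect".toList ++ repc ("from".toList) ("fr/**/om".toList)
                    (repc ("select".toList) ("se/**/lect".toList)
                      (repc ("union".toList) ("un/**/ion".toList) r)) :=
              repc_append 'f' "rom".toList ("fr/**/om".toList) ['s','e','/','*','*','/','l','e','c','t'] _ (by intro c hc; fin_cases hc <;> decide)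
            rw [e3]
            rw [scanSql, if_neg h1, if_pos h2]
            have hdrop : ('e'::'l'::'e'::'c'::'t'::r).drop 5 = r := rfl
            rw [hdrop, ihm r (by simp at hs; omega)]
          · by_cases h3 : List.isPrefixOf ("from".toList) (c :: t)
            · obtain ⟨r, hr⟩ := List.isPrefixOf_iff_prefix.mp h3
              obtain ⟨rfl, rfl⟩ : c = 'f' ∧ t = 'r'::'o'::'m'::r := by
                simpa using hr.symm
              have e1 : repc ("union".toList) ("un/**/ion".toList) ('f'::'r'::'o'::'m'::r)
                  = 'f'::'r'::'o'::'m':: repc ("union".toList) ("un/**/ion".toList) r :=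
                repc_append 'u' "nion".toList ['u','n','/','*','*','/','i','o','n'] ['f','r','o','m'] r (by intro c hc; fin_cases hc <;> decide)
              rw [e1]
              have e2 : repc ("select".toList) ("se/**/lect".toList)
                    ('f'::'r'::'o'::'m':: repc ("union".toList) ("un/**/ion".toList) r)
                  = 'f'::'r'::'o'::'m':: repc ("select".toList) ("se/**/lect".toList)
                      (repc ("union".toList) ("un/**/ion".toList) r) :=
                repc_append 's' "elect".toList ("se/**/lect".toList) ['f','r','o','m'] _ (by intro c hc; fin_cases hc <;> decide)
              rw [e2]
              have e3 : repc ("from".toList) ("fr/**/om".toList)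
                    ('f'::'r'::'o'::'m':: repc ("select".toList) ("se/**/lect".toList)
                      (repc ("union".toList) ("un/**/ion".toList) r))
                  = "fr/**/om".toList ++ repc ("from".toList) ("fr/**/om".toList)
                      (repc ("select".toList) ("se/**/lect".toList)
                        (repc ("union".toList) ("un/**/ion".toList) r)) :=
                repc_emit 'f' "rom".toList "fr/**/om".toList _
              rw [e3]
              rw [scanSql, if_neg h1, if_neg h2, if_pos h3]
              have hdrop : ('r'::'o'::'m'::r).drop 3 = r := rfl
              rw [hdrop, ihm r (by simp at hs; omega)]
            · -- no keyword matches at this position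
              have e1 : repc ("union".toList) ("un/**/ion".toList) (c :: t)
                  = c :: repc ("union".toList) ("un/**/ion".toList) t := by
                rw [repc, if_neg h1]
              rw [e1]
              have hS : ¬ List.isPrefixOf ("select".toList)
                  (c :: repc ("union".toList) ("un/**/ion".toList) t) := by
                intro hp
                have hp' := List.cons_prefix_cons.mp (List.isPrefixOf_iff_prefix.mp hp)
                have hc : c = 's' := hp'.1.symm
                have htr : ("elect".toList <+: repc ("union".toList) ("un/**/ion".toList) t) ↔
                    "elect".toList <+: t :=
                  prefix_transfer 'u' "nion".toList "n/**/ion".toList t ['e','l','e','c','t'] (by intro c hc; fin_cases hc <;> decide)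
                have : "elect".toList <+: t := htr.mp hp'.2
                exact h2 (List.isPrefixOf_iff_prefix.mpr
                  (List.cons_prefix_cons.mpr ⟨hc.symm, this⟩))
              have e2 : repc ("select".toList) ("se/**/lect".toList)
                    (c :: repc ("union".toList) ("un/**/ion".toList) t)
                  = c :: repc ("select".toList) ("se/**/lect".toList)
                      (repc ("union".toList) ("un/**/ion".toList) t) := by
                rw [repc, if_neg hS]
              rw [e2]
              have hF : ¬ List.isPrefixOf ("from".toList)
                  (c :: repc ("select".toList) ("se/**/lect".toList)
                    (repc ("union".toList) ("un/**/ion".toList) t)) := by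
                intro hp
                have hp' := List.cons_prefix_cons.mp (List.isPrefixOf_iff_prefix.mp hp)
                have hc : c = 'f' := hp'.1.symm
                have htr1 : ("rom".toList <+: repc ("select".toList) ("se/**/lect".toList)
                      (repc ("union".toList) ("un/**/ion".toList) t)) ↔
                    "rom".toList <+: repc ("union".toList) ("un/**/ion".toList) t :=
                  prefix_transfer 's' "elect".toList "e/**/lect".toList _ ['r','o','m'] (by intro c hc; fin_cases hc <;> decide)
                have htr2 : ("rom".toList <+: repc ("union".toList) ("un/**/ion".toList) t) ↔
                    "rom".toList <+: t :=
                  prefix_transfer 'u' "nion".toList "n/**/ion".toList t ['r','o','m'] (by intro c hc; fin_cases hc <;> decide)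
                have : "rom".toList <+: t := htr2.mp (htr1.mp hp'.2)
                exact h3 (List.isPrefixOf_iff_prefix.mpr
                  (List.cons_prefix_cons.mpr ⟨hc.symm, this⟩))
              have e3 : repc ("from".toList) ("fr/**/om".toList)
                    (c :: repc ("select".toList) ("se/**/lect".toList)
                      (repc ("union".toList) ("un/**/ion".toList) t))
                  = c :: repc ("from".toList) ("fr/**/om".toList)
                      (repc ("select".toList) ("se/**/lect".toList)
                        (repc ("union".toList) ("un/**/ion".toList) t)) := by
                rw [repc, if_neg hF]
              rw [e3]
              rw [scanSql, if_neg h1, if_neg h2, if_neg h3]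
              rw [ihm t (by simp at hs; omega)]
  exact main s.length s le_rfl


theorem repc_eq_scanJs (s : List Char) :
    repc ("script".toList) ("scri/**/pt".toList) s = scanJs s := by
  have main : ∀ n (s : List Char), s.length ≤ n →
      repc ("script".toList) ("scri/**/pt".toList) s = scanJs s := by
    intro n
    induction n with
    | zero =>
      intro s hs
      have : s = [] := by cases s with | nil => rfl | cons c t => simp at hs
      subst this; rw [repc, scanJs]
    | succ m ihm =>
      intro s hs
      cases s with
      | nil => rw [repc, scanJs]
      | cons c t =>
        rw [repc, scanJs]
        by_cases h : List.isPrefixOf ("script".toList) (c :: t)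
        · rw [if_pos h, if_pos h]
          rw [show ("script".toList.length - 1) = 5 from rfl]
          rw [ihm (t.drop 5) (by simp at hs ⊢; omega)]
        · rw [if_neg h, if_neg h]
          rw [ihm t (by simp at hs; omega)]
  exact main s.length s le_rfl

-- the guard 'word in result.lower()' is redundant for a lowercase word: replace is the identity when absent
theorem guarded_replace (w new : List Char) (hw : w ≠ [])
    (hlow : w.map PySem.Chars.lowerChar = w) (res : List Char) :
    (if PySem.Chars.isIn w (PySem.Chars.lower res) then PySem.Chars.replace res w new else res)
      = repc w new res := by
  by_cases hin : PySem.Chars.isIn w (PySem.Chars.lower res) = true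
  · rw [if_pos hin, replace_eq_repc _ _ _ hw]
  · rw [if_neg hin]
    refine (repc_of_not_infix _ _ _ ?_).symm
    intro hi
    have hlower : w <:+: PySem.Chars.lower res := by
      have := hi.map PySem.Chars.lowerChar
      rwa [hlow] at this
    exact hin ((PySem.Chars.isIn_iff_infix w (PySem.Chars.lower res)).mpr hlower)

-- ===== VERDICT (by name: the statement is the Claim_ definition above) =====
theorem comment_injection_py_spec : Claim_equal_comment_injection_py := by
  intro payload param_type _
  unfold Spec_comment_injection_py comment_injection_py comment_injection_py_alt
  by_cases hs : param_type == "sql"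
  · rw [if_pos hs, if_pos hs]
    simp only [List.foldl]
    rw [guarded_replace ("union".toList) _ (by decide) rfl]
    rw [guarded_replace ("select".toList) _ (by decide) rfl]
    rw [guarded_replace ("from".toList) _ (by decide) rfl]
    have h1 : (PySem.Chars.slice ("union".toList) none (some 2) ++ "/**/".toList ++
        PySem.Chars.slice ("union".toList) (some 2) none) = "un/**/ion".toList := rfl
    have h2 : (PySem.Chars.slice ("select".toList) none (some 2) ++ "/**/".toList ++
        PySem.Chars.slice ("select".toList) (some 2) none) = "se/**/lect".toList := rfl
    have h3 : (PySem.Chars.slice ("from".toList) none (some 2) ++ "/**/".toList ++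
        PySem.Chars.slice ("from".toList) (some 2) none) = "fr/**/om".toList := rfl
    rw [h1, h2, h3, chain_eq_scanSql]
  · rw [if_neg hs, if_neg hs]
    unfold PySem.Str.replace
    rw [replace_eq_repc _ _ _ (by decide), repc_eq_scanJs]
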